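-- pv_equiv track=rewrite | github.com/Hellol77/Algorithm | 프로그래머스/3/131703. 2차원 동전 뒤집기/2차원 동전 뒤집기.py | solution
-- ===== SOURCE A (Python) =====
-- def solution(beginning, target):
--     row,col = len(beginning),len(beginning[0])
--     arr = [[1 if beginning[i][j] != target[i][j] else 0 for j in range(col)] for i in range(row)]
--
--     mini = 1000000
--     baseRow = arr[0]
--
--     for r in arr:
--         diff = 0
--         for otherRow in arr:
--             if r == otherRow: continue
--             tempRow = [1-i for i in otherRow]
--             if r == tempRow:
--                 diff+=1
--                 continue
--             return -1
--         diff+=sum(r)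
--         if diff < mini:
--             baseRow=r
--             mini = diff
--     return mini
-- ===== SOURCE B (Python) =====
-- def _diffrow(col, brow, trow):
--     return [1 if brow[j] != trow[j] else 0 for j in range(col)]
--
-- def solution(beginning, target):
--     col = len(beginning[0])
--     base = [1 if beginning[0][j] != target[0][j] else 0 for j in range(col)]
--     s0 = sum(base)
--     c0 = 0
--     c1 = 0
--     for brow, trow in zip(beginning, target):
--         d = _diffrow(col, brow, trow)
--         if d == base:
--             c0 += 1
--         elif all(x + y == 1 for x, y in zip(d, base)):
--             c1 += 1
--         else:
--             return -1
--     # the answer is the smaller of the two candidate costs, capped at 1000000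
--     # (the same upper bound A's minimum starts from)
--     best = min(1000000, c1 + s0)
--     if c1:
--         best = min(best, c0 + (col - s0))
--     return best
-- ===== Notes on version B (the rewrite author's own statement) =====
-- stated objective: faster
-- what changed: Instead of A's nested loop that re-scans all rows for every row (comparing each pair and recomputing complements), B makes a single pass over the row pairs classifying each diff-row as equal-to-first-row or its complement, counts the two types, and evaluates the two candidate costs in closed form, capped at the same 1000000 bound A's minimum starts from.
import Mathlib
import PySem

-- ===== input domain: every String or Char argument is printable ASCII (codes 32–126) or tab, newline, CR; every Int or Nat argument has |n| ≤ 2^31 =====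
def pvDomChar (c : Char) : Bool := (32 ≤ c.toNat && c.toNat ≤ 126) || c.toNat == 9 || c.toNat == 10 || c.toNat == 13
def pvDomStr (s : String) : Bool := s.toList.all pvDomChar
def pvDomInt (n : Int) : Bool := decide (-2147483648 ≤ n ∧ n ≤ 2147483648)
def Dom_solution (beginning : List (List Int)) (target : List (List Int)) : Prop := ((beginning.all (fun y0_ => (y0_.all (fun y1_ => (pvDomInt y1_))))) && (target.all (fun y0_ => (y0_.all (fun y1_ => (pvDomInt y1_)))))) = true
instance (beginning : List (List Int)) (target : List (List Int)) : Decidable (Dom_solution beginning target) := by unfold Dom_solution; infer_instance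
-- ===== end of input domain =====

-- B replaces A's quadratic all-pairs row scan by one linear classification pass
-- plus a closed-form evaluation of the two candidate costs (objective: faster).

-- ===== PORT A =====
-- inner 'for otherRow in arr' loop: accumulates diff, none = the 'return -1' path
def pvInnerA (r : List Int) (diff : Int) : List (List Int) → Option Int
  | [] => some diff
  | o :: rest =>
    if r = o then pvInnerA r diff rest
    else if r = o.map (fun i => 1 - i) then pvInnerA r (diff + 1) rest
    else none

-- outer 'for r in arr' loop (baseRow is dead state in A and is not carried)
def pvOuterA (arr : List (List Int)) (mini : Int) : List (List Int) → Int
  | [] => mini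
  | r :: rest =>
    match pvInnerA r 0 arr with
    | none => -1
    | some d =>
      let diff := d + r.sum
      pvOuterA arr (if diff < mini then diff else mini) rest

def solution (beginning : List (List Int)) (target : List (List Int)) : Int :=
  let row : Int := beginning.length
  let col : Int := (PySem.List.pyGetD beginning 0 []).length
  let arr : List (List Int) :=
    (PySem.List.pyRange 0 row 1).map (fun i =>
      (PySem.List.pyRange 0 col 1).map (fun j =>
        if PySem.List.pyGetD (PySem.List.pyGetD beginning i []) j 0
             ≠ PySem.List.pyGetD (PySem.List.pyGetD target i []) j 0 then 1 else 0))
  pvOuterA arr 1000000 arr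

-- ===== PORT B =====
def pvDiffRowB (col : Int) (brow trow : List Int) : List Int :=
  (PySem.List.pyRange 0 col 1).map (fun j =>
    if PySem.List.pyGetD brow j 0 ≠ PySem.List.pyGetD trow j 0 then 1 else 0)

-- the single classification pass over zip(beginning, target); none = the 'return -1' path
def pvClassifyB (col : Int) (base : List Int) (c0 c1 : Int) :
    List (List Int × List Int) → Option (Int × Int)
  | [] => some (c0, c1)
  | (brow, trow) :: rest =>
    let d := pvDiffRowB col brow trow
    if d = base then pvClassifyB col base (c0 + 1) c1 rest
    else if (d.zip base).all (fun p => p.1 + p.2 == 1) then pvClassifyB col base c0 (c1 + 1) rest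
    else none

def solution_alt (beginning : List (List Int)) (target : List (List Int)) : Int :=
  let col : Int := (PySem.List.pyGetD beginning 0 []).length
  let base := pvDiffRowB col (PySem.List.pyGetD beginning 0 []) (PySem.List.pyGetD target 0 [])
  let s0 := base.sum
  match pvClassifyB col base 0 0 (beginning.zip target) with
  | none => -1
  | some (c0, c1) =>
    let best := min 1000000 (c1 + s0)
    if c1 ≠ 0 then min best (c0 + (col - s0)) else best

-- ===== PRECONDITION & SPEC =====
-- Pre_ excludes exactly the inputs on which A raises an IndexError: empty beginning,
-- or — when the first row is nonempty, so A actually indexes — target shorter than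
-- beginning or a row shorter than the first row of beginning.
def Pre_solution (beginning : List (List Int)) (target : List (List Int)) : Prop :=
  beginning ≠ [] ∧
  ((beginning.headD []).length = 0 ∨
    (beginning.length ≤ target.length ∧
      ∀ p ∈ beginning.zip target,
        (beginning.headD []).length ≤ p.1.length ∧ (beginning.headD []).length ≤ p.2.length))
instance (beginning : List (List Int)) (target : List (List Int)) : Decidable (Pre_solution beginning target) := by unfold Pre_solution; infer_instance

def pvWitness_solution : List (List Int) × List (List Int) := ([[0, 1], [1, 0]], [[1, 1], [0, 0]])

def Spec_solution (beginning : List (List Int)) (target : List (List Int)) (out : Int) : Prop := out = solution_alt beginning target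
instance (beginning : List (List Int)) (target : List (List Int)) (out : Int) : Decidable (Spec_solution beginning target out) := by unfold Spec_solution; infer_instance

-- ===== CLAIM (what is proved, stated in full; the proofs are below) =====
def Claim_equal_solution : Prop := ∀ (beginning : List (List Int)) (target : List (List Int)), Dom_solution beginning target → Pre_solution beginning target → Spec_solution beginning target (solution beginning target)


-- ===== LEMMAS AND PROOFS =====

-- complement of a 0/1 row, as A's 'tempRow' computes it
def pvComp (r : List Int) : List Int := r.map (fun i => 1 - i)

theorem pvComp_comp (r : List Int) : pvComp (pvComp r) = r := by
  induction r with
  | nil => rfl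
  | cons x xs ih =>
    simp [pvComp] at ih ⊢

theorem pvComp_sum (r : List Int) : (pvComp r).sum = (r.length : Int) - r.sum := by
  induction r with
  | nil => simp [pvComp]
  | cons x xs ih => simp [pvComp] at ih ⊢; omega

theorem pv_all_zip_iff {d base : List Int} (h : d.length = base.length) :
    ((d.zip base).all (fun p => p.1 + p.2 == 1) = true) ↔ d = pvComp base := by
  induction d generalizing base with
  | nil => cases base with
    | nil => simp [pvComp]
    | cons y ys => simp at h
  | cons x xs ih => cases base with
    | nil => simp at h
    | cons y ys =>
      simp at h
      simp [pvComp, List.zip_cons_cons, ih h]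
      intro _
      omega

theorem pvDiffRowB_length (col : Int) (b t : List Int) :
    (pvDiffRowB col b t).length = col.toNat := by
  simp [pvDiffRowB, PySem.List.length_pyRange_one]

-- B's classification pass: the good case counts the two row types
theorem pvClassifyB_some (col : Int) (base : List Int) (hbl : base.length = col.toNat)
    (l : List (List Int × List Int))
    (hgood : ∀ p ∈ l, pvDiffRowB col p.1 p.2 = base ∨ pvDiffRowB col p.1 p.2 = pvComp base)
    (c0 c1 : Int) :
    pvClassifyB col base c0 c1 l =
      some (c0 + (l.countP (fun p => decide (pvDiffRowB col p.1 p.2 = base)) : Int),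
            c1 + (l.countP (fun p => decide (pvDiffRowB col p.1 p.2 ≠ base)) : Int)) := by
  induction l generalizing c0 c1 with
  | nil => simp [pvClassifyB]
  | cons p rest ih =>
    obtain ⟨brow, trow⟩ := p
    have hp := hgood (brow, trow) (by simp)
    have hrest : ∀ q ∈ rest, pvDiffRowB col q.1 q.2 = base ∨ pvDiffRowB col q.1 q.2 = pvComp base :=
      fun q hq => hgood q (by simp [hq])
    by_cases hd : pvDiffRowB col brow trow = base
    · simp [pvClassifyB, hd, ih hrest]
      omega
    · have hc : pvDiffRowB col brow trow = pvComp base := by tauto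
      have hlen : (pvDiffRowB col brow trow).length = base.length := by
        rw [pvDiffRowB_length, hbl]
      rw [pvClassifyB]
      simp only [hd, if_false]
      rw [if_pos ((pv_all_zip_iff hlen).mpr hc)]
      simp [ih hrest, hd]
      omega

-- B's classification pass: a row of neither type aborts with none
theorem pvClassifyB_none (col : Int) (base : List Int) (hbl : base.length = col.toNat)
    (l : List (List Int × List Int))
    (hbad : ∃ p ∈ l, pvDiffRowB col p.1 p.2 ≠ base ∧ pvDiffRowB col p.1 p.2 ≠ pvComp base)
    (c0 c1 : Int) :
    pvClassifyB col base c0 c1 l = none := by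
  induction l generalizing c0 c1 with
  | nil => simp at hbad
  | cons p rest ih =>
    obtain ⟨brow, trow⟩ := p
    rcases hbad with ⟨q, hq, hq1, hq2⟩
    rcases List.mem_cons.mp hq with rfl | hmem
    · have hlen : (pvDiffRowB col brow trow).length = base.length := by
        rw [pvDiffRowB_length, hbl]
      rw [pvClassifyB]
      simp only [hq1, if_false]
      rw [if_neg (fun hall => hq2 ((pv_all_zip_iff hlen).mp hall))]
    · rw [pvClassifyB]
      split
      · exact ih ⟨q, hmem, hq1, hq2⟩ _ _
      · split
        · exact ih ⟨q, hmem, hq1, hq2⟩ _ _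
        · rfl

-- A's inner loop: under row-consistency it counts the rows unequal to r
theorem pvInnerA_some (r : List Int) (l : List (List Int))
    (h : ∀ o ∈ l, o = r ∨ r = pvComp o) (d : Int) :
    pvInnerA r d l = some (d + (l.countP (fun o => decide (o ≠ r)) : Int)) := by
  induction l generalizing d with
  | nil => simp [pvInnerA]
  | cons o rest ih =>
    have ho := h o (by simp)
    have hrest : ∀ o' ∈ rest, o' = r ∨ r = pvComp o' := fun o' h' => h o' (by simp [h'])
    by_cases hor : r = o
    · rw [pvInnerA, if_pos hor, ih hrest d]
      have hcnt : List.countP (fun o' => decide (o' ≠ r)) (o :: rest)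
          = List.countP (fun o' => decide (o' ≠ r)) rest := by
        simp [hor]
      rw [hcnt]
    · have hc : r = pvComp o := by tauto
      rw [pvInnerA, if_neg hor, if_pos (by simpa [pvComp] using hc), ih hrest (d + 1)]
      have hne : o ≠ r := fun h' => hor h'.symm
      have hcnt : List.countP (fun o' => decide (o' ≠ r)) (o :: rest)
          = List.countP (fun o' => decide (o' ≠ r)) rest + 1 := by
        simp [hne]
      rw [hcnt]
      congr 1
      push_cast
      ring

theorem pvInnerA_none (r : List Int) (l : List (List Int))
    (h : ∃ o ∈ l, o ≠ r ∧ r ≠ pvComp o) (d : Int) :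
    pvInnerA r d l = none := by
  induction l generalizing d with
  | nil => simp at h
  | cons o rest ih =>
    rcases h with ⟨q, hq, hq1, hq2⟩
    rcases List.mem_cons.mp hq with rfl | hmem
    · rw [pvInnerA, if_neg (fun h' => hq1 h'.symm),
        if_neg (by simpa [pvComp] using hq2)]
    · rw [pvInnerA]
      split
      · exact ih ⟨q, hmem, hq1, hq2⟩ _
      · split
        · exact ih ⟨q, hmem, hq1, hq2⟩ _
        · rfl

-- A's row cost: complement-row count plus the row's 1-count
def pvDval (arr : List (List Int)) (r : List Int) : Int :=
  (arr.countP (fun o => decide (o ≠ r)) : Int) + r.sum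

theorem pvOuterA_fold (arr : List (List Int)) (rows : List (List Int)) (mini : Int)
    (h : ∀ r ∈ rows, ∀ o ∈ arr, o = r ∨ r = pvComp o) :
    pvOuterA arr mini rows = rows.foldl (fun m r => min m (pvDval arr r)) mini := by
  induction rows generalizing mini with
  | nil => simp [pvOuterA]
  | cons r rest ih =>
    rw [pvOuterA, pvInnerA_some r arr (h r (by simp)) 0]
    simp only [List.foldl_cons]
    have hrest : ∀ r' ∈ rest, ∀ o ∈ arr, o = r' ∨ r' = pvComp o :=
      fun r' h' => h r' (List.mem_cons_of_mem _ h')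
    rw [ih _ hrest]
    congr 1
    simp only [pvDval, zero_add]
    rcases lt_or_ge ((arr.countP (fun o => decide (o ≠ r)) : Int) + r.sum) mini with hlt | hge
    · rw [if_pos hlt, min_eq_right (le_of_lt hlt)]
    · rw [if_neg (not_lt.mpr hge), min_eq_left hge]

theorem pv_foldl_min_le_init (l : List Int) (m : Int) : l.foldl min m ≤ m := by
  induction l generalizing m with
  | nil => simp
  | cons x xs ih => exact le_trans (ih (min m x)) (min_le_left _ _)

theorem pv_foldl_min_le_mem (l : List Int) (m : Int) : ∀ x ∈ l, l.foldl min m ≤ x := by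
  induction l generalizing m with
  | nil => simp
  | cons y ys ih =>
    intro x hx
    rcases List.mem_cons.mp hx with rfl | hmem
    · exact le_trans (pv_foldl_min_le_init ys (min m x)) (min_le_right _ _)
    · exact ih (min m y) x hmem

theorem pv_foldl_min_mem (l : List Int) (m : Int) : l.foldl min m = m ∨ l.foldl min m ∈ l := by
  induction l generalizing m with
  | nil => simp
  | cons x xs ih =>
    rcases ih (min m x) with h | h
    · rcases le_total m x with hmx | hxm
      · left; simp only [List.foldl_cons]; rw [h, min_eq_left hmx]
      · right; simp only [List.foldl_cons]; rw [h, min_eq_right hxm]; simp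
    · right; simp only [List.foldl_cons]; exact List.mem_cons_of_mem _ h

theorem pvDiffRowB_col_zero (b t : List Int) : pvDiffRowB 0 b t = [] := by
  rw [pvDiffRowB, PySem.List.pyRange_one_eq_nil le_rfl]
  rfl

-- a min-fold over a list whose elements are all a or b, with both present
theorem pv_fold_two (L : List Int) (m a b : Int) (ha : a ∈ L) (hb : b ∈ L)
    (hall : ∀ x ∈ L, x = a ∨ x = b) :
    L.foldl min m = min m (min a b) := by
  have h1 := pv_foldl_min_le_mem L m a ha
  have h2 := pv_foldl_min_le_mem L m b hb
  have h0 := pv_foldl_min_le_init L m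
  rcases pv_foldl_min_mem L m with h | h
  · rw [h] at h1 h2 ⊢; omega
  · rcases hall _ h with h' | h' <;> rw [h'] at h0 h1 h2 ⊢ <;> omega

theorem pv_outer_all_nil (arr : List (List Int)) (h : ∀ r ∈ arr, r = ([] : List Int))
    (hne : arr ≠ []) : pvOuterA arr 1000000 arr = 0 := by
  have hgood : ∀ r ∈ arr, ∀ o ∈ arr, o = r ∨ r = pvComp o := by
    intro r hr o ho
    rw [h r hr, h o ho]
    exact Or.inl rfl
  rw [pvOuterA_fold arr arr 1000000 hgood, ← List.foldl_map]
  have h0 : pvDval arr [] = 0 := by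
    rw [pvDval]
    have hz : arr.countP (fun o => decide (o ≠ [])) = 0 := by
      rw [List.countP_eq_zero]
      intro a ha
      have ha' := h a ha
      subst ha'
      simp
    rw [hz]
    simp
  obtain ⟨r0, rest, hr⟩ : ∃ x xs, arr = x :: xs := by
    cases arr with
    | nil => exact absurd rfl hne
    | cons x xs => exact ⟨x, xs, rfl⟩
  have hmem0 : pvDval arr [] ∈ arr.map (pvDval arr) := by
    have hm := List.mem_map_of_mem (f := pvDval arr) (show r0 ∈ arr by rw [hr]; simp)
    rwa [h r0 (by rw [hr]; simp)] at hm
  have hall : ∀ x ∈ arr.map (pvDval arr), x = pvDval arr [] ∨ x = pvDval arr [] := by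
    intro x hx
    obtain ⟨r, hrm, rfl⟩ := List.mem_map.mp hx
    left
    rw [h r hrm]
  rw [pv_fold_two (arr.map (pvDval arr)) 1000000 (pvDval arr []) (pvDval arr [])
      hmem0 hmem0 hall, min_self, h0]
  norm_num

-- A's diff matrix equals the diff rows B computes along zip(beginning, target)
theorem pv_arr_eq (beginning target : List (List Int))
    (hlen : beginning.length ≤ target.length) (col : Int) :
    (PySem.List.pyRange 0 (beginning.length : Int) 1).map (fun i =>
      (PySem.List.pyRange 0 col 1).map (fun j =>
        if PySem.List.pyGetD (PySem.List.pyGetD beginning i []) j 0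
             ≠ PySem.List.pyGetD (PySem.List.pyGetD target i []) j 0 then 1 else 0))
    = (beginning.zip target).map (fun p => pvDiffRowB col p.1 p.2) := by
  apply List.ext_getElem
  · simp [PySem.List.length_pyRange_one]
    omega
  · intro i h1 h2
    have hib : i < beginning.length := by
      simpa [PySem.List.length_pyRange_one] using h1
    have hit : i < target.length := lt_of_lt_of_le hib hlen
    have hb' : PySem.List.pyGetD beginning ((i : Nat) : Int) [] = beginning[i] := by
      rw [PySem.List.pyGetD_natCast]
      exact List.getD_eq_getElem beginning [] hib
    have ht' : PySem.List.pyGetD target ((i : Nat) : Int) [] = target[i] := by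
      rw [PySem.List.pyGetD_natCast]
      exact List.getD_eq_getElem target [] hit
    simp only [List.getElem_map, List.getElem_zip]
    rw [PySem.List.getElem_pyRange_one]
    simp only [zero_add, hb', ht', pvDiffRowB]

-- ===== VERDICT (by name: the statement is the Claim_ definition above) =====
theorem solution_spec : Claim_equal_solution := by
  intro beginning target _hdom hpre
  obtain ⟨hne, hshape⟩ := hpre
  unfold Spec_solution
  obtain ⟨hb, tb, rfl⟩ : ∃ x xs, beginning = x :: xs := by
    cases beginning with
    | nil => exact absurd rfl hne
    | cons x xs => exact ⟨x, xs, rfl⟩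
  by_cases hcol0 : hb.length = 0
  · -- the first row is empty: every diff row is empty and both programs return 0
    have hAz : solution (hb :: tb) target = 0 := by
      simp only [solution, PySem.List.pyGetD_zero_cons, hcol0, Nat.cast_zero,
        PySem.List.pyRange_one_eq_nil (le_refl (0 : Int)), List.map_nil]
      apply pv_outer_all_nil
      · intro r hr
        obtain ⟨i, -, rfl⟩ := List.mem_map.mp hr
        rfl
      · apply List.ne_nil_of_length_pos
        rw [List.length_map, PySem.List.length_pyRange_one]
        simp
    have hBz : solution_alt (hb :: tb) target = 0 := by
      simp only [solution_alt, PySem.List.pyGetD_zero_cons, hcol0, Nat.cast_zero]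
      rw [pvDiffRowB_col_zero]
      rw [pvClassifyB_some 0 [] (by simp) ((hb :: tb).zip target)
            (fun p _ => Or.inl (pvDiffRowB_col_zero p.1 p.2)) 0 0]
      simp [pvDiffRowB_col_zero]
    rw [hAz, hBz]
  · -- the first row is nonempty: A indexes target, so the shape side of Pre_ holds
    obtain ⟨hlen, _hrows⟩ := hshape.resolve_left (by simpa using hcol0)
    obtain ⟨ht, tt, rfl⟩ : ∃ y ys, target = y :: ys := by
      cases target with
      | nil => simp at hlen
      | cons y ys => exact ⟨y, ys, rfl⟩
    -- abbreviations
    set col : Int := (hb.length : Int) with hcol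
    set pairs : List (List Int × List Int) := (hb :: tb).zip (ht :: tt) with hpairs
    set f : List Int × List Int → List Int := fun p => pvDiffRowB col p.1 p.2 with hf
    set base : List Int := pvDiffRowB col hb ht with hbase
    set arr : List (List Int) := pairs.map f with harr
    have hbl : base.length = col.toNat := pvDiffRowB_length col hb ht
    -- reduce both programs
    have hA : solution (hb :: tb) (ht :: tt) = pvOuterA arr 1000000 arr := by
      simp only [solution, PySem.List.pyGetD_zero_cons]
      rw [pv_arr_eq (hb :: tb) (ht :: tt) hlen col]
    have hB : solution_alt (hb :: tb) (ht :: tt) =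
        (match pvClassifyB col base 0 0 pairs with
         | none => -1
         | some (c0, c1) =>
           if c1 ≠ 0 then min (min 1000000 (c1 + base.sum)) (c0 + (col - base.sum))
           else min 1000000 (c1 + base.sum)) := by
      simp only [solution_alt, PySem.List.pyGetD_zero_cons]
      rfl
    rw [hA, hB]
    have harr_cons : arr = base :: (tb.zip tt).map f := by
      simp [harr, hpairs, hf, hbase]
    by_cases hgood : ∀ p ∈ pairs, f p = base ∨ f p = pvComp base
    · -- every diff row is base or its complement
      rw [pvClassifyB_some col base hbl pairs hgood 0 0]
      simp only [zero_add]
      set c0n : Nat := pairs.countP (fun p => decide (pvDiffRowB col p.1 p.2 = base)) with hc0n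
      set c1n : Nat := pairs.countP (fun p => decide (pvDiffRowB col p.1 p.2 ≠ base)) with hc1n
      have hmem : ∀ r ∈ arr, r = base ∨ r = pvComp base := by
        intro r hr
        obtain ⟨p, hp, rfl⟩ := List.mem_map.mp hr
        exact hgood p hp
      have harr_good : ∀ r ∈ arr, ∀ o ∈ arr, o = r ∨ r = pvComp o := by
        intro r hr o ho
        rcases hmem r hr with rfl | rfl <;> rcases hmem o ho with rfl | h2
        · exact Or.inl rfl
        · rw [h2]; right; rw [pvComp_comp]
        · exact Or.inr rfl
        · rw [h2]; left; rfl
      rw [pvOuterA_fold arr arr 1000000 harr_good, ← List.foldl_map]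
      -- counts over arr are counts over pairs
      have hcnt_base : (arr.countP (fun o => decide (o ≠ base)) : Int) = (c1n : Int) := by
        rw [harr, List.countP_map]; rfl
      have hdval_base : pvDval arr base = (c1n : Int) + base.sum := by
        rw [pvDval, hcnt_base]
      have hbase_mem : pvDval arr base ∈ arr.map (pvDval arr) :=
        List.mem_map_of_mem (by rw [harr_cons]; simp)
      by_cases hc1 : (c1n : Int) ≠ 0
      · -- both row types occur: A's minimum is over the two candidate costs
        rw [if_pos hc1]
        have hxb : ∃ p ∈ pairs, pvDiffRowB col p.1 p.2 ≠ base := by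
          by_contra hno
          push Not at hno
          have : c1n = 0 := by
            rw [hc1n, List.countP_eq_zero]
            intro p hp
            simp [hno p hp]
          simp [this] at hc1
        obtain ⟨p1, hp1, hp1ne⟩ := hxb
        have hp1c : pvDiffRowB col p1.1 p1.2 = pvComp base :=
          (hgood p1 hp1).resolve_left hp1ne
        have hne_base : base ≠ pvComp base := by
          intro h
          exact hp1ne (by rw [hp1c, ← h])
        have hcomp_mem : pvComp base ∈ arr := by
          rw [harr]
          have hm := List.mem_map_of_mem (f := f) hp1
          rwa [show f p1 = pvComp base from hp1c] at hm
        have hcnt_comp : (arr.countP (fun o => decide (o ≠ pvComp base)) : Int) = (c0n : Int) := by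
          rw [harr, List.countP_map, hc0n]
          congr 1
          apply List.countP_congr
          intro p hp
          show decide (pvDiffRowB col p.1 p.2 ≠ pvComp base) = true
              ↔ decide (pvDiffRowB col p.1 p.2 = base) = true
          rcases hgood p hp with h | h
          · have h' : pvDiffRowB col p.1 p.2 = base := h
            simp [h', hne_base]
          · have h' : pvDiffRowB col p.1 p.2 = pvComp base := h
            simp [h', Ne.symm hne_base]
        have hdval_comp : pvDval arr (pvComp base) = (c0n : Int) + (col - base.sum) := by
          rw [pvDval, hcnt_comp, pvComp_sum]
          have h2 : (base.length : Int) = col := by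
            rw [hbl, hcol]; simp
          rw [h2]
        have hcomp_memL : pvDval arr (pvComp base) ∈ arr.map (pvDval arr) :=
          List.mem_map_of_mem hcomp_mem
        have hallL : ∀ x ∈ arr.map (pvDval arr), x = pvDval arr base ∨ x = pvDval arr (pvComp base) := by
          intro x hx
          obtain ⟨r, hr, rfl⟩ := List.mem_map.mp hx
          rcases hmem r hr with rfl | rfl
          · exact Or.inl rfl
          · exact Or.inr rfl
        rw [pv_fold_two (arr.map (pvDval arr)) 1000000 (pvDval arr base) (pvDval arr (pvComp base))
              hbase_mem hcomp_memL hallL, hdval_base, hdval_comp, min_assoc]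
      · -- only the base type occurs
        rw [if_neg hc1]
        have hc1z : c1n = 0 := by
          by_contra h
          exact hc1 (by exact_mod_cast h)
        have hallbase : ∀ p ∈ pairs, pvDiffRowB col p.1 p.2 = base := by
          have h0 := List.countP_eq_zero.mp hc1z
          intro p hp
          have := h0 p hp
          simpa using this
        have hallL : ∀ x ∈ arr.map (pvDval arr), x = pvDval arr base ∨ x = pvDval arr base := by
          intro x hx
          obtain ⟨r, hr, rfl⟩ := List.mem_map.mp hx
          obtain ⟨p, hp, rfl⟩ := List.mem_map.mp hr
          left
          show pvDval arr (pvDiffRowB col p.1 p.2) = pvDval arr base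
          rw [hallbase p hp]
        rw [pv_fold_two (arr.map (pvDval arr)) 1000000 (pvDval arr base) (pvDval arr base)
              hbase_mem hbase_mem hallL, min_self, hdval_base]
    · -- some row is of neither type: both programs return -1
      push Not at hgood
      obtain ⟨p, hp, hp1, hp2⟩ := hgood
      rw [pvClassifyB_none col base hbl pairs ⟨p, hp, hp1, hp2⟩ 0 0]
      rw [harr_cons, pvOuterA]
      have hinner : pvInnerA base 0 arr = none := by
        apply pvInnerA_none
        refine ⟨f p, ?_, hp1, ?_⟩
        · rw [harr]; exact List.mem_map_of_mem hp
        · intro h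
          apply hp2
          show pvDiffRowB col p.1 p.2 = pvComp base
          have h' : base = pvComp (pvDiffRowB col p.1 p.2) := h
          rw [h', pvComp_comp]
      rw [← harr_cons, hinner]
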